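-- pv_equiv track=rewrite | github.com/sangeon22/CodingTest | 이것이_코딩테스트다_실습/BinarySearch.py | function
-- ===== SOURCE A (Python) =====
-- def function(arr, target, start, end):
--     while start <= end:
--         mid = (start + end) // 2
--         slice_list = list(map(lambda x: x - mid, arr))
--         total = sum([i for i in slice_list if i > 0])
--         if total == target:
--             return mid
--         elif total < target:
--             end = mid - 1
--         else:
--             start = mid + 1
--     return None
-- ===== SOURCE B (Python) =====
-- def function(arr, target, start, end):
--     # Sort once and build prefix sums; each probe mid's 'sum of excess' then
--     # comes from a hand-rolled bisect + prefix-sum lookup instead of a rescan.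
--     s = sorted(arr)
--     n = len(s)
--     prefix = [0]
--     acc = 0
--     for x in s:
--         acc += x
--         prefix.append(acc)
--     while start <= end:
--         mid = (start + end) // 2
--         lo, hi = 0, n
--         while lo < hi:
--             m = (lo + hi) // 2
--             if s[m] <= mid:
--                 lo = m + 1
--             else:
--                 hi = m
--         total = (prefix[n] - prefix[lo]) - mid * (n - lo)
--         if total == target:
--             return mid
--         elif total < target:
--             end = mid - 1
--         else:
--             start = mid + 1
--     return None
-- ===== Notes on version B (the rewrite author's own statement) =====
-- stated objective: alternative
-- what changed: B sorts the array once and builds prefix sums, then answers each binary-search probe's 'sum of excess over mid' by a bisect on the sorted array plus a prefix-sum lookup instead of re-scanning and re-summing the whole array for every probe.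
import Mathlib
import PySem

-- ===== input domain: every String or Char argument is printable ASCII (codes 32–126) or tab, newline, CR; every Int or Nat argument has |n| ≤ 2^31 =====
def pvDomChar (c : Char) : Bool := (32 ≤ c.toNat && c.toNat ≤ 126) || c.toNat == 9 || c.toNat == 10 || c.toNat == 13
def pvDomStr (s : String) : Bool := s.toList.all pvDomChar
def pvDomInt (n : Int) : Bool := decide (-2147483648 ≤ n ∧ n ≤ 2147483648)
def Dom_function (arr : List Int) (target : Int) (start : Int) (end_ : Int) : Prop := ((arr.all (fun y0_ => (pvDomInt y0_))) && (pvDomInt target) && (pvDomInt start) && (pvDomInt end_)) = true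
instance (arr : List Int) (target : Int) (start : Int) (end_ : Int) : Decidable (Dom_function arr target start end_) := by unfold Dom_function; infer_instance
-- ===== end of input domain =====

-- B sorts once and uses prefix sums plus a bisect per probe instead of re-summing the whole array; proved equal to A on all inputs.


-- ===== PORT A =====
-- A's `while start <= end` loop; the Nat fuel (initial interval size, which strictly
-- shrinks each iteration) only makes the recursion structural, it never changes the value.
def pvALoopGo (arr : List Int) (target : Int) : Nat → Int → Int → Option Int
  | 0, _, _ => none
  | fuel + 1, start, end_ =>
    if start ≤ end_ then
      let mid := PySem.Int.floordiv (start + end_) 2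
      let slice_list := arr.map (fun x => x - mid)
      let total := (slice_list.filter (fun i => 0 < i)).sum
      if total = target then some mid
      else if total < target then pvALoopGo arr target fuel start (mid - 1)
      else pvALoopGo arr target fuel (mid + 1) end_
    else none

def function (arr : List Int) (target : Int) (start : Int) (end_ : Int) : Option Int :=
  pvALoopGo arr target ((end_ - start + 1).toNat) start end_

-- ===== PORT B =====
-- inner `while lo < hi` bisect of Source B (fuel = interval size, same totality guard)
def pvBisectGo (s : List Int) (mid : Int) : Nat → Int → Int → Int
  | 0, lo, _ => lo
  | fuel + 1, lo, hi =>
    if lo < hi then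
      let m := PySem.Int.floordiv (lo + hi) 2
      if PySem.List.pyGetD s m 0 ≤ mid then pvBisectGo s mid fuel (m + 1) hi
      else pvBisectGo s mid fuel lo m
    else lo

-- outer `while start <= end` loop of Source B (s, n, prefix are loop-invariant)
def pvBLoopGo (s prefix_ : List Int) (n : Int) (target : Int) : Nat → Int → Int → Option Int
  | 0, _, _ => none
  | fuel + 1, start, end_ =>
    if start ≤ end_ then
      let mid := PySem.Int.floordiv (start + end_) 2
      let lo := pvBisectGo s mid n.toNat 0 n
      let total := (PySem.List.pyGetD prefix_ n 0 - PySem.List.pyGetD prefix_ lo 0) - mid * (n - lo)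
      if total = target then some mid
      else if total < target then pvBLoopGo s prefix_ n target fuel start (mid - 1)
      else pvBLoopGo s prefix_ n target fuel (mid + 1) end_
    else none

def function_alt (arr : List Int) (target : Int) (start : Int) (end_ : Int) : Option Int :=
  let s := PySem.List.sorted arr (fun x => x) false
  let n : Int := s.length
  let pa := s.foldl (fun (st : List Int × Int) x => (st.1 ++ [st.2 + x], st.2 + x)) ([0], 0)
  pvBLoopGo s pa.1 n target ((end_ - start + 1).toNat) start end_

-- ===== PRECONDITION & SPEC =====
def Spec_function (arr : List Int) (target : Int) (start : Int) (end_ : Int) (out : Option Int) : Prop := out = function_alt arr target start end_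
instance (arr : List Int) (target : Int) (start : Int) (end_ : Int) (out : Option Int) : Decidable (Spec_function arr target start end_ out) := by unfold Spec_function; infer_instance

-- ===== CLAIM (what is proved, stated in full; the proofs are below) =====
def Claim_equal_function : Prop := ∀ (arr : List Int) (target : Int) (start : Int) (end_ : Int), Dom_function arr target start end_ → Spec_function arr target start end_ (function arr target start end_)

-- ===== LEMMAS AND PROOFS =====

-- running partial sums, as Source B's prefix loop produces them (without the leading 0)
def pvSums : List Int → Int → List Int
  | [], _ => []
  | x :: t, a => (a + x) :: pvSums t (a + x)

theorem pvSums_length (s : List Int) (a : Int) : (pvSums s a).length = s.length := by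
  induction s generalizing a with
  | nil => rfl
  | cons x t ih => simp [pvSums, ih]

theorem pvFold_eq (s : List Int) (p : List Int) (a : Int) :
    s.foldl (fun (st : List Int × Int) x => (st.1 ++ [st.2 + x], st.2 + x)) (p, a)
      = (p ++ pvSums s a, a + s.sum) := by
  induction s generalizing p a with
  | nil => simp [pvSums]
  | cons x t ih => simp [pvSums, ih, List.append_assoc]; ring

theorem pvSums_getD (s : List Int) (a : Int) (j : Nat) (hj : j < s.length) :
    (pvSums s a).getD j 0 = a + (s.take (j + 1)).sum := by
  induction s generalizing a j with
  | nil => simp at hj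
  | cons x t ih =>
    cases j with
    | zero => simp [pvSums]
    | succ k =>
      simp only [pvSums, List.getD_cons_succ, List.take_succ_cons, List.sum_cons]
      rw [ih (a + x) k (by simpa using hj)]
      ring

-- prefix[i] = sum of the first i elements, for 0 ≤ i ≤ n
theorem pvPrefix_getD (s : List Int) (i : Nat) (hi : i ≤ s.length) :
    (0 :: pvSums s 0).getD i 0 = (s.take i).sum := by
  cases i with
  | zero => simp
  | succ k =>
    simp only [List.getD_cons_succ]
    rw [pvSums_getD s 0 k (by omega)]
    simp

-- prefix list lookup at a Nat index, pyGetD form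
theorem pvPrefix_pyGetD (s : List Int) (i : Nat) (hi : i ≤ s.length) :
    PySem.List.pyGetD (0 :: pvSums s 0) (i : Int) 0 = (s.take i).sum := by
  have hlen : i < (0 :: pvSums s 0).length := by
    simp only [List.length_cons, pvSums_length]
    omega
  rw [PySem.List.pyGetD_eq_getElem (0 :: pvSums s 0) 0 (by omega)
      (by simp only [List.length_cons, pvSums_length]; push_cast; omega)]
  simp only [Int.toNat_natCast]
  rw [← List.getD_eq_getElem (0 :: pvSums s 0) 0 hlen]
  exact pvPrefix_getD s i hi

-- bisect invariant: if everything left of lo is ≤ mid and everything right of hi is > mid,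
-- the loop returns a split point r with the same properties separating at r.
theorem pvBisect_spec (s : List Int) (mid : Int) (hs : s.Pairwise (· ≤ ·)) :
    ∀ (fuel : Nat) (lo hi : Int), (hi - lo).toNat ≤ fuel → 0 ≤ lo → lo ≤ hi → hi ≤ s.length →
    (∀ j : Nat, j < s.length → (j : Int) < lo → s.getD j 0 ≤ mid) →
    (∀ j : Nat, j < s.length → hi ≤ (j : Int) → mid < s.getD j 0) →
    ∃ r : Nat, pvBisectGo s mid fuel lo hi = (r : Int) ∧ r ≤ s.length ∧
      (∀ j : Nat, j < s.length → j < r → s.getD j 0 ≤ mid) ∧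
      (∀ j : Nat, j < s.length → r ≤ j → mid < s.getD j 0) := by
  intro fuel
  induction fuel with
  | zero =>
    intro lo hi hfuel h0 hlh hn hL hR
    refine ⟨lo.toNat, by simp only [pvBisectGo]; omega, by omega, ?_, ?_⟩
    · intro j hj hjr
      exact hL j hj (by omega)
    · intro j hj hjr
      exact hR j hj (by omega)
  | succ fuel ih =>
    intro lo hi hfuel h0 hlh hn hL hR
    by_cases hlt : lo < hi
    · have hmb := PySem.Int.floordiv_two_mid_bounds (lo := lo) (hi := hi) (le_of_lt hlt)
      have hmlt : PySem.Int.floordiv (lo + hi) 2 < hi := by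
        rw [PySem.Int.floordiv_lt_iff_lt_mul (by omega)]
        omega
      have hmN : (PySem.Int.floordiv (lo + hi) 2).toNat < s.length := by omega
      have hsm : PySem.List.pyGetD s (PySem.Int.floordiv (lo + hi) 2) 0
          = s.getD (PySem.Int.floordiv (lo + hi) 2).toNat 0 := by
        rw [List.getD_eq_getElem s 0 hmN]
        exact PySem.List.pyGetD_eq_getElem s 0 (by omega) (by omega)
      simp only [pvBisectGo]
      rw [if_pos hlt]
      by_cases hle : PySem.List.pyGetD s (PySem.Int.floordiv (lo + hi) 2) 0 ≤ mid
      · rw [if_pos hle]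
        apply ih _ _ (by omega) (by omega) (by omega) hn _ hR
        intro j hj hjm
        rw [hsm] at hle
        have hjm' : j ≤ (PySem.Int.floordiv (lo + hi) 2).toNat := by omega
        rcases lt_or_eq_of_le hjm' with hlt' | heq
        · have hpw := (List.pairwise_iff_getElem).1 hs j _ hj hmN hlt'
          have hle2 : s.getD j 0 ≤ s.getD (PySem.Int.floordiv (lo + hi) 2).toNat 0 := by
            rwa [List.getD_eq_getElem s 0 hj, List.getD_eq_getElem s 0 hmN]
          exact le_trans hle2 hle
        · rw [heq]
          exact hle
      · rw [if_neg hle]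
        apply ih _ _ (by omega) h0 (by omega) (by omega) hL
        intro j hj hjm
        rw [hsm] at hle
        have hjm' : (PySem.Int.floordiv (lo + hi) 2).toNat ≤ j := by omega
        rcases lt_or_eq_of_le hjm' with hlt' | heq
        · have hpw := (List.pairwise_iff_getElem).1 hs _ j hmN hj hlt'
          have hle2 : s.getD (PySem.Int.floordiv (lo + hi) 2).toNat 0 ≤ s.getD j 0 := by
            rwa [List.getD_eq_getElem s 0 hj, List.getD_eq_getElem s 0 hmN]
          omega
        · rw [← heq]
          omega
    · refine ⟨lo.toNat, by simp only [pvBisectGo]; rw [if_neg hlt]; omega, by omega, ?_, ?_⟩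
      · intro j hj hjr
        exact hL j hj (by omega)
      · intro j hj hjr
        exact hR j hj (by omega)

-- on a list split at r as in pvBisect_spec, filtering "(> mid)" is dropping r elements
theorem pvFilter_eq_drop (s : List Int) (mid : Int) (r : Nat) (hr : r ≤ s.length)
    (hL : ∀ j : Nat, j < s.length → j < r → s.getD j 0 ≤ mid)
    (hR : ∀ j : Nat, j < s.length → r ≤ j → mid < s.getD j 0) :
    s.filter (fun x => decide (mid < x)) = s.drop r := by
  conv_lhs => rw [← List.take_append_drop r s, List.filter_append]
  have h1 : (s.take r).filter (fun x => decide (mid < x)) = [] := by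
    rw [List.filter_eq_nil_iff]
    intro x hx
    obtain ⟨j, hj, hget⟩ := List.mem_iff_getElem.1 hx
    rw [List.length_take] at hj
    have hjlen : j < s.length := by omega
    have hjr : j < r := by omega
    have hval : s.getD j 0 = x := by
      rw [List.getD_eq_getElem s 0 hjlen, ← hget, List.getElem_take]
    have hle := hL j hjlen hjr
    rw [hval] at hle
    simp only [decide_eq_true_eq]
    omega
  have h2 : (s.drop r).filter (fun x => decide (mid < x)) = s.drop r := by
    rw [List.filter_eq_self]
    intro x hx
    obtain ⟨j, hj, hget⟩ := List.mem_iff_getElem.1 hx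
    rw [List.length_drop] at hj
    have hjlen : r + j < s.length := by omega
    have hval : s.getD (r + j) 0 = x := by
      rw [List.getD_eq_getElem s 0 hjlen, ← hget, List.getElem_drop]
    have hgt := hR (r + j) hjlen (by omega)
    rw [hval] at hgt
    simp only [decide_eq_true_eq]
    omega
  rw [h1, h2, List.nil_append]

theorem pvSum_map_sub (l : List Int) (mid : Int) :
    (l.map (fun x => x - mid)).sum = l.sum - mid * l.length := by
  induction l with
  | nil => simp
  | cons x t ih =>
    simp only [List.map_cons, List.sum_cons, List.length_cons, ih]
    push_cast
    ring

-- the heart: B's prefix-sum/bisect total equals A's rescanned total, for every mid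
theorem pvTotal_eq (arr : List Int) (mid : Int) :
    ((PySem.List.pyGetD (0 :: pvSums (PySem.List.sorted arr (fun x => x) false) 0)
        ((PySem.List.sorted arr (fun x => x) false).length : Int) 0
      - PySem.List.pyGetD (0 :: pvSums (PySem.List.sorted arr (fun x => x) false) 0)
        (pvBisectGo (PySem.List.sorted arr (fun x => x) false) mid
          ((PySem.List.sorted arr (fun x => x) false).length : Int).toNat 0
          ((PySem.List.sorted arr (fun x => x) false).length : Int)) 0)
      - mid * (((PySem.List.sorted arr (fun x => x) false).length : Int)
          - pvBisectGo (PySem.List.sorted arr (fun x => x) false) mid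
              ((PySem.List.sorted arr (fun x => x) false).length : Int).toNat 0
              ((PySem.List.sorted arr (fun x => x) false).length : Int)))
    = ((arr.map (fun x => x - mid)).filter (fun i => 0 < i)).sum := by
  set s := PySem.List.sorted arr (fun x => x) false with hs_def
  have hperm : s.Perm arr := PySem.List.sorted_perm arr (fun x => x) false
  have hsort : s.Pairwise (· ≤ ·) := by
    have := PySem.List.sorted_pairwise arr (fun x => x)
    simpa [hs_def] using this
  obtain ⟨r, hrval, hrle, hL, hR⟩ :=
    pvBisect_spec s mid hsort ((s.length : Int)).toNat 0 (s.length : Int) (by omega) le_rfl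
      (by omega) le_rfl (by intro j _ h; omega) (by intro j hj h; omega)
  have hfm : (arr.map (fun x => x - mid)).filter (fun i => decide (0 < i))
      = (arr.filter (fun x => decide (mid < x))).map (fun x => x - mid) := by
    rw [List.filter_map]
    congr 1
    apply List.filter_congr
    intro x _
    simp only [Function.comp, decide_eq_decide]
    omega
  have hfd : s.filter (fun x => decide (mid < x)) = s.drop r := pvFilter_eq_drop s mid r hrle hL hR
  have hsum : ((arr.filter (fun x => decide (mid < x))).map (fun x => x - mid)).sum
      = ((s.drop r).map (fun x => x - mid)).sum := by
    rw [← hfd]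
    exact (((hperm.filter _).map _).sum_eq).symm
  have hpn : PySem.List.pyGetD (0 :: pvSums s 0) ((s.length : Int)) 0 = s.sum := by
    rw [pvPrefix_pyGetD s s.length le_rfl, List.take_length]
  have hpr : PySem.List.pyGetD (0 :: pvSums s 0)
      (pvBisectGo s mid ((s.length : Int)).toNat 0 (s.length : Int)) 0 = (s.take r).sum := by
    rw [hrval]
    exact pvPrefix_pyGetD s r hrle
  rw [hfm, hsum, pvSum_map_sub, hpn, hpr, hrval]
  have hds : (s.drop r).sum = s.sum - (s.take r).sum := by
    have h2 : (s.take r).sum + (s.drop r).sum = s.sum := by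
      rw [← List.sum_append, List.take_append_drop]
    omega
  have hdl : ((s.drop r).length : Int) = (s.length : Int) - r := by
    rw [List.length_drop]
    omega
  rw [hds, hdl]

-- outer loops agree step for step (for any sufficient shared fuel)
theorem pvLoop_eq (arr : List Int) (target : Int) :
    ∀ (k : Nat) (start end_ : Int), (end_ - start + 1).toNat ≤ k →
    pvALoopGo arr target k start end_
      = pvBLoopGo (PySem.List.sorted arr (fun x => x) false)
          (0 :: pvSums (PySem.List.sorted arr (fun x => x) false) 0)
          ((PySem.List.sorted arr (fun x => x) false).length : Int) target k start end_ := by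
  intro k
  induction k with
  | zero =>
    intro start end_ hk
    simp only [pvALoopGo, pvBLoopGo]
  | succ k ih =>
    intro start end_ hk
    by_cases hle : start ≤ end_
    · have hmb := PySem.Int.floordiv_two_mid_bounds (lo := start) (hi := end_) hle
      simp only [pvALoopGo, pvBLoopGo]
      rw [if_pos hle, if_pos hle]
      rw [pvTotal_eq arr (PySem.Int.floordiv (start + end_) 2)]
      split_ifs with h1 h2
      · rfl
      · apply ih
        generalize PySem.Int.floordiv (start + end_) 2 = q at hmb ⊢
        omega
      · apply ih
        generalize PySem.Int.floordiv (start + end_) 2 = q at hmb ⊢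
        omega
    · simp only [pvALoopGo, pvBLoopGo]
      rw [if_neg hle, if_neg hle]

-- ===== VERDICT (by name: the statement is the Claim_ definition above) =====
theorem function_spec : Claim_equal_function := by
  intro arr target start end_ _
  unfold Spec_function function
  rw [pvLoop_eq arr target ((end_ - start + 1).toNat) start end_ le_rfl]
  simp only [function_alt, pvFold_eq, List.singleton_append]
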